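-- pv_equiv track=rewrite | github.com/6210qwe/leetcode_py | leetcode_solutions/by_id/q4030.py | maximize_cyclic_partition_score
-- ===== SOURCE A (Python) =====
-- from typing import List, Optional
--
-- def maximize_cyclic_partition_score(nums: List[int], k: int) -> int:
--     n = len(nums)
--     nums = nums + nums  # 处理循环数组
--     max_val = [0] * (2 * n)
--     min_val = [0] * (2 * n)
--     max_val[0] = min_val[0] = nums[0]
--
--     for i in range(1, 2 * n):
--         max_val[i] = max(max_val[i - 1], nums[i])
--         min_val[i] = min(min_val[i - 1], nums[i])
--
--     dp = [[0] * (k + 1) for _ in range(n + 1)]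
--
--     for i in range(1, n + 1):
--         dp[i][1] = max_val[i - 1] - min_val[i - 1]
--
--     for j in range(2, k + 1):
--         for i in range(j, n + 1):
--             for l in range(j - 1, i):
--                 dp[i][j] = max(dp[i][j], dp[l][j - 1] + max_val[i - 1] - min_val[l - 1])
--
--     return max(dp[n][j] for j in range(1, k + 1))
-- ===== SOURCE B (Python) =====
-- from typing import List, Optional
--
-- def maximize_cyclic_partition_score(nums: List[int], k: int) -> int:
--     # O(n*min(k,n)) single-pass DP: the inner scan of A collapses into a running
--     # maximum of prev[l] - pmin[l-1], carried while i advances.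
--     n = len(nums)
--     pmax = [0] * n
--     pmin = [0] * n
--     pmax[0] = pmin[0] = nums[0]
--     for i in range(1, n):
--         pmax[i] = max(pmax[i - 1], nums[i])
--         pmin[i] = min(pmin[i - 1], nums[i])
--     prev = [pmax[i] - pmin[i] for i in range(n)]   # prev[i-1] = dp[i][1]
--     ans = prev[n - 1]
--     for j in range(2, min(k, n) + 1):
--         cur = [0] * n                              # cur[i-1] = dp[i][j]
--         best = prev[j - 2] - pmin[j - 2]
--         cur[j - 1] = pmax[j - 1] + best
--         for i in range(j + 1, n + 1):
--             best = max(best, prev[i - 2] - pmin[i - 2])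
--             cur[i - 1] = pmax[i - 1] + best
--         ans = max(ans, cur[n - 1])
--         prev = cur
--     return ans
-- ===== Notes on version B (the rewrite author's own statement) =====
-- stated objective: faster
-- what changed: B drops A's doubled array and triple loop: it keeps prefix max/min of nums only, and for each round j sweeps once keeping a running maximum of prev[l-1]-pmin[l-1], so the inner scan over split points disappears; rounds stop at min(k,n) since later columns are empty.
import Mathlib
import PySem

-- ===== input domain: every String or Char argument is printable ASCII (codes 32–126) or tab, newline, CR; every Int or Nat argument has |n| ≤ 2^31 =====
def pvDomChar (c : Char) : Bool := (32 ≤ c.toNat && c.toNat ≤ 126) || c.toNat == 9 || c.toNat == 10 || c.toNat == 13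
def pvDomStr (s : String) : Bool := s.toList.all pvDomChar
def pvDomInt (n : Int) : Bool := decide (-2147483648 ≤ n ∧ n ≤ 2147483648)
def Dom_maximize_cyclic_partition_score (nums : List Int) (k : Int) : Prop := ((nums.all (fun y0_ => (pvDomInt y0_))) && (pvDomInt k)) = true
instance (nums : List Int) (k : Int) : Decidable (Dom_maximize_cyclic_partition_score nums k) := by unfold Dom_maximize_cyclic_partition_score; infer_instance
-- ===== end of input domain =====

-- B replaces A's O(n²·k) triple-loop DP by an O(n·min(k,n)) two-loop DP: A's inner scan over
-- split points collapses into a running maximum carried while the right end advances.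
-- Python integer arrays (zero-initialised, written/read cell by cell) are ported as
-- association lists index ↦ value with most-recent-write-first lookup (default 0); on
-- inputs satisfying Pre_ every read hits an index the Python code has initialised.

-- 1-D array: read / write one cell
def pvGet1 (f : List (Int × Int)) (i : Int) : Int := ((f.find? (fun e => e.1 = i)).map (·.2)).getD 0
def pvSet1 (f : List (Int × Int)) (i v : Int) : List (Int × Int) := (i, v) :: f
-- 2-D array: read / write one cell
def pvGet2 (dp : List ((Int × Int) × Int)) (i j : Int) : Int := ((dp.find? (fun e => e.1 = (i, j))).map (·.2)).getD 0
def pvSet2 (dp : List ((Int × Int) × Int)) (i j v : Int) : List ((Int × Int) × Int) := ((i, j), v) :: dp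

-- ===== PORT A =====
def maximize_cyclic_partition_score (nums : List Int) (k : Int) : Int :=
  let n : Int := nums.length
  let nums2 := nums ++ nums                                  -- nums = nums + nums
  -- max_val = [0]*(2n); min_val = [0]*(2n); max_val[0] = min_val[0] = nums[0]
  let mv0 := pvSet1 [] 0 (PySem.List.pyGetD nums2 0 0)
  -- for i in range(1, 2*n): max_val[i] = max(...); min_val[i] = min(...)
  let st := (PySem.List.pyRange 1 (2 * n)).foldl
      (fun (st : List (Int × Int) × List (Int × Int)) i =>
        (pvSet1 st.1 i (max (pvGet1 st.1 (i - 1)) (PySem.List.pyGetD nums2 i 0)),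
         pvSet1 st.2 i (min (pvGet1 st.2 (i - 1)) (PySem.List.pyGetD nums2 i 0)))) (mv0, mv0)
  let maxv := st.1
  let minv := st.2
  -- dp = [[0]*(k+1) for _ in range(n+1)];  for i in range(1, n+1): dp[i][1] = ...
  let dp1 := (PySem.List.pyRange 1 (n + 1)).foldl
      (fun dp i => pvSet2 dp i 1 (pvGet1 maxv (i - 1) - pvGet1 minv (i - 1))) []
  -- for j in range(2, k+1): for i in range(j, n+1): for l in range(j-1, i):
  --   dp[i][j] = max(dp[i][j], dp[l][j-1] + max_val[i-1] - min_val[l-1])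
  let dp2 := (PySem.List.pyRange 2 (k + 1)).foldl (fun dp j =>
      (PySem.List.pyRange j (n + 1)).foldl (fun dp i =>
        (PySem.List.pyRange (j - 1) i).foldl (fun dp l =>
          pvSet2 dp i j (max (pvGet2 dp i j)
            (pvGet2 dp l (j - 1) + pvGet1 maxv (i - 1) - pvGet1 minv (l - 1)))) dp) dp) dp1
  -- return max(dp[n][j] for j in range(1, k+1))
  (PySem.List.max? ((PySem.List.pyRange 1 (k + 1)).map (fun j => pvGet2 dp2 n j)) (fun y => y)).getD 0

-- ===== PORT B =====
def maximize_cyclic_partition_score_alt (nums : List Int) (k : Int) : Int :=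
  let n : Int := nums.length
  -- pmax = [0]*n; pmin = [0]*n; pmax[0] = pmin[0] = nums[0]
  let pm0 := pvSet1 [] 0 (PySem.List.pyGetD nums 0 0)
  -- for i in range(1, n): pmax[i] = max(...); pmin[i] = min(...)
  let st := (PySem.List.pyRange 1 n).foldl
      (fun (st : List (Int × Int) × List (Int × Int)) i =>
        (pvSet1 st.1 i (max (pvGet1 st.1 (i - 1)) (PySem.List.pyGetD nums i 0)),
         pvSet1 st.2 i (min (pvGet1 st.2 (i - 1)) (PySem.List.pyGetD nums i 0)))) (pm0, pm0)
  let pmax := st.1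
  let pmin := st.2
  -- prev = [pmax[i] - pmin[i] for i in range(n)]   (built element by element)
  let prev := (PySem.List.pyRange 0 n).foldl
      (fun p i => pvSet1 p i (pvGet1 pmax i - pvGet1 pmin i)) []
  -- ans = prev[n-1]
  let ans := pvGet1 prev (n - 1)
  -- for j in range(2, min(k, n) + 1): ...
  let res := (PySem.List.pyRange 2 (min k n + 1)).foldl
      (fun (s : Int × List (Int × Int)) j =>
        let prev := s.2
        -- cur = [0]*n; best = prev[j-2] - pmin[j-2]; cur[j-1] = pmax[j-1] + best
        let best0 := pvGet1 prev (j - 2) - pvGet1 pmin (j - 2)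
        let cur0 := pvSet1 [] (j - 1) (pvGet1 pmax (j - 1) + best0)
        -- for i in range(j+1, n+1): best = max(best, prev[i-2] - pmin[i-2]); cur[i-1] = pmax[i-1] + best
        let inner := (PySem.List.pyRange (j + 1) (n + 1)).foldl
            (fun (t : Int × List (Int × Int)) i =>
              let best := max t.1 (pvGet1 prev (i - 2) - pvGet1 pmin (i - 2))
              (best, pvSet1 t.2 (i - 1) (pvGet1 pmax (i - 1) + best))) (best0, cur0)
        -- ans = max(ans, cur[n-1]); prev = cur
        (max s.1 (pvGet1 inner.2 (n - 1)), inner.2)) (ans, prev)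
  res.1

-- ===== PRECONDITION & SPEC =====
-- A raises IndexError on empty nums (nums[0]) and on k ≤ 0 (each dp row has k+1 ≤ 1 cells,
-- so the write dp[i][1] is out of range); exactly those inputs are excluded.
def Pre_maximize_cyclic_partition_score (nums : List Int) (k : Int) : Prop :=
  nums ≠ [] ∧ 1 ≤ k
instance (nums : List Int) (k : Int) : Decidable (Pre_maximize_cyclic_partition_score nums k) := by
  unfold Pre_maximize_cyclic_partition_score; infer_instance

def pvWitness_maximize_cyclic_partition_score : List Int × Int := ([3, -1, 4, 1], 2)

def Spec_maximize_cyclic_partition_score (nums : List Int) (k : Int) (out : Int) : Prop :=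
  out = maximize_cyclic_partition_score_alt nums k
instance (nums : List Int) (k : Int) (out : Int) : Decidable (Spec_maximize_cyclic_partition_score nums k out) := by
  unfold Spec_maximize_cyclic_partition_score; infer_instance

-- ===== CLAIM (what is proved, stated in full; the proofs are below) =====
def Claim_equal_maximize_cyclic_partition_score : Prop := ∀ (nums : List Int) (k : Int), Dom_maximize_cyclic_partition_score nums k → Pre_maximize_cyclic_partition_score nums k → Spec_maximize_cyclic_partition_score nums k (maximize_cyclic_partition_score nums k)


-- ===== LEMMAS AND PROOFS =====

@[simp] theorem pvGet1_nil (i : Int) : pvGet1 [] i = 0 := rfl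
theorem pvGet1_set1 (f : List (Int × Int)) (i v x : Int) :
    pvGet1 (pvSet1 f i v) x = if x = i then v else pvGet1 f x := by
  rcases eq_or_ne x i with h | h
  · subst h; simp [pvGet1, pvSet1]
  · simp [pvGet1, pvSet1, List.find?_cons_of_neg, Ne.symm h, h]
@[simp] theorem pvGet2_nil (i j : Int) : pvGet2 [] i j = 0 := rfl
theorem pvGet2_set2 (dp : List ((Int × Int) × Int)) (i j v x y : Int) :
    pvGet2 (pvSet2 dp i j v) x y = if x = i ∧ y = j then v else pvGet2 dp x y := by
  by_cases h : x = i ∧ y = j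
  · obtain ⟨h1, h2⟩ := h; subst h1; subst h2; simp [pvGet2, pvSet2]
  · have hne : ¬ ((i, j).1 = x ∧ (i, j).2 = y) := fun hc => h ⟨hc.1.symm, hc.2.symm⟩
    simp only [pvGet2, pvSet2]
    rw [List.find?_cons_of_neg]
    · simp [h]
    · simpa using hne

-- prefix extremum of xs over indices 0..t (the value Python's max_val[t]/min_val[t] holds)
def pvPfx (f : Int → Int → Int) (xs : List Int) : Nat → Int
  | 0 => xs.headD 0
  | t + 1 => f (pvPfx f xs t) (xs.getD (t + 1) 0)

-- characteristic prefix-extremum map of xs with bound b: value on [0,b), 0 elsewhere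
def pvChar (f : Int → Int → Int) (xs : List Int) (b : Int) : Int → Int :=
  fun x => if 0 ≤ x ∧ x < b then pvPfx f xs x.toNat else 0

-- the mathematical DP table: pvDP Mv mv n j i = A's dp[i][j] for 1 ≤ j ≤ filled columns
def pvDP (Mv mv : Int → Int) (n : Int) : Nat → Int → Int
  | 0, _ => 0
  | 1, i => if 1 ≤ i ∧ i ≤ n then Mv (i - 1) - mv (i - 1) else 0
  | (j + 2), i =>
      if (j + 2 : Int) ≤ i ∧ i ≤ n then
        (PySem.List.pyRange ((j : Int) + 1) i).foldl
          (fun acc l => max acc (pvDP Mv mv n (j + 1) l + Mv (i - 1) - mv (l - 1))) 0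
      else 0

-- A's dp after all columns ≤ J are filled
def pvG (Mv mv : Int → Int) (n J : Int) : Int → Int → Int :=
  fun x y => if 1 ≤ y ∧ y ≤ J then pvDP Mv mv n y.toNat x else 0

-- B's running maximum of prev[l-1] - pmin[l-1] over l ∈ {j-1} ∪ [j, i)
def pvBest (Mv mv : Int → Int) (n j i : Int) : Int :=
  (PySem.List.pyRange j i).foldl
    (fun b l => max b (pvDP Mv mv n (j - 1).toNat l - mv (l - 1)))
    (pvDP Mv mv n (j - 1).toNat (j - 1) - mv (j - 2))

theorem pvPfx_min_le_max (xs : List Int) (t : Nat) : pvPfx min xs t ≤ pvPfx max xs t := by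
  induction t with
  | zero => simp [pvPfx]
  | succ t ih =>
    simp only [pvPfx]
    exact le_trans (min_le_left _ _) (le_trans (le_max_left _ _) (max_le_max ih (le_refl _)))

theorem pvPfx_max_mono (xs : List Int) {t t' : Nat} (h : t ≤ t') :
    pvPfx max xs t ≤ pvPfx max xs t' := by
  induction t' with
  | zero => simp_all
  | succ u ih =>
    by_cases h' : t ≤ u
    · exact le_trans (ih h') (by simp only [pvPfx]; exact le_max_left _ _)
    · have ht : t = u + 1 := by omega
      subst ht; exact le_refl _

theorem pvPfx_append (f : Int → Int → Int) (xs : List Int) (hne : xs ≠ []) (t : Nat)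
    (h : t < xs.length) : pvPfx f (xs ++ xs) t = pvPfx f xs t := by
  induction t with
  | zero => cases xs with
            | nil => simp at hne
            | cons a l => simp [pvPfx]
  | succ u ih =>
    simp only [pvPfx]
    rw [List.getD_append _ _ _ _ h, ih (by omega)]


-- B's accumulated answer after rounds 2..J
def pvAns (Mv mv : Int → Int) (n J : Int) : Int :=
  (PySem.List.pyRange 2 (J + 1)).foldl (fun a j => max a (pvDP Mv mv n j.toNat n)) (pvDP Mv mv n 1 n)

theorem pvFoldl_max_init (f : Int → Int) :
    ∀ (ls : List Int) (x : Int), x ≤ ls.foldl (fun a l => max a (f l)) x := by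
  intro ls
  induction ls with
  | nil => intro x; exact le_refl x
  | cons l rest ih =>
    intro x
    exact le_trans (le_max_left x (f l)) (ih (max x (f l)))

-- the prefix max/min building loop (shared by both ports), characterised
theorem pvPrefixFold (xs : List Int) (b : Int) (hb : 1 ≤ b) :
    ∀ x, (pvGet1 ((PySem.List.pyRange 1 b).foldl
      (fun (st : List (Int × Int) × List (Int × Int)) i =>
        (pvSet1 st.1 i (max (pvGet1 st.1 (i - 1)) (PySem.List.pyGetD xs i 0)),
         pvSet1 st.2 i (min (pvGet1 st.2 (i - 1)) (PySem.List.pyGetD xs i 0))))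
      (pvSet1 [] 0 (PySem.List.pyGetD xs 0 0), pvSet1 [] 0 (PySem.List.pyGetD xs 0 0))).1 x
        = pvChar max xs b x)
    ∧ (pvGet1 ((PySem.List.pyRange 1 b).foldl
      (fun (st : List (Int × Int) × List (Int × Int)) i =>
        (pvSet1 st.1 i (max (pvGet1 st.1 (i - 1)) (PySem.List.pyGetD xs i 0)),
         pvSet1 st.2 i (min (pvGet1 st.2 (i - 1)) (PySem.List.pyGetD xs i 0))))
      (pvSet1 [] 0 (PySem.List.pyGetD xs 0 0), pvSet1 [] 0 (PySem.List.pyGetD xs 0 0))).2 x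
        = pvChar min xs b x) := by
  induction b, hb using Int.le_induction with
  | base =>
    intro x
    rw [PySem.List.pyRange_one_eq_nil (le_refl 1)]
    have hv : PySem.List.pyGetD xs 0 0 = xs.headD 0 := by
      rw [PySem.List.pyGetD_of_nonneg xs 0 (le_refl 0)]
      cases xs <;> simp
    constructor <;>
    · simp only [List.foldl_nil, pvGet1_set1, pvGet1_nil]
      by_cases hx : x = 0
      · subst hx
        rw [if_pos rfl]
        unfold pvChar
        rw [if_pos (by omega)]
        exact hv
      · rw [if_neg hx]
        unfold pvChar
        rw [if_neg (by omega)]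
  | succ b hb ih =>
    intro x
    rw [PySem.List.pyRange_one_succ_right (by omega : (1 : Int) ≤ b), List.foldl_append]
    simp only [List.foldl_cons, List.foldl_nil]
    have hbt : b.toNat = (b - 1).toNat + 1 := by omega
    have hget : PySem.List.pyGetD xs b 0 = xs.getD b.toNat 0 :=
      PySem.List.pyGetD_of_nonneg xs 0 (by omega)
    
    constructor
    · rw [pvGet1_set1]
      by_cases hx : x = b
      · subst hx
        rw [if_pos rfl, (ih (x := x - 1)).1]
        show max (pvChar max xs x (x - 1)) (PySem.List.pyGetD xs x 0) = pvChar max xs (x + 1) x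
        unfold pvChar
        rw [if_pos (by omega), if_pos (by omega), hget, hbt]
        simp only [pvPfx]
      · rw [if_neg hx, (ih (x := x)).1]
        unfold pvChar
        by_cases hc : 0 ≤ x ∧ x < b
        · rw [if_pos hc, if_pos (by omega)]
        · rw [if_neg hc, if_neg (by omega)]
    · rw [pvGet1_set1]
      by_cases hx : x = b
      · subst hx
        rw [if_pos rfl, (ih (x := x - 1)).2]
        show min (pvChar min xs x (x - 1)) (PySem.List.pyGetD xs x 0) = pvChar min xs (x + 1) x
        unfold pvChar
        rw [if_pos (by omega), if_pos (by omega), hget, hbt]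
        simp only [pvPfx]
      · rw [if_neg hx, (ih (x := x)).2]
        unfold pvChar
        by_cases hc : 0 ≤ x ∧ x < b
        · rw [if_pos hc, if_pos (by omega)]
        · rw [if_neg hc, if_neg (by omega)]

-- unfolding pvDP at an integer column index ≥ 2
theorem pvDP_two (Mv mv : Int → Int) (n j i : Int) (hj : 2 ≤ j) :
    pvDP Mv mv n j.toNat i =
      if j ≤ i ∧ i ≤ n then
        (PySem.List.pyRange (j - 1) i).foldl
          (fun acc l => max acc (pvDP Mv mv n (j - 1).toNat l + Mv (i - 1) - mv (l - 1))) 0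
      else 0 := by
  obtain ⟨t, ht⟩ : ∃ t : Nat, j.toNat = t + 2 := ⟨j.toNat - 2, by omega⟩
  have h1 : ((t : Int) + 2) = j := by omega
  have h2 : ((t : Int) + 1) = j - 1 := by omega
  have h3 : (t + 1 : Nat) = (j - 1).toNat := by omega
  rw [ht]
  simp only [pvDP]
  rw [h1, h2, h3]

theorem pvDP_nonneg (Mv mv : Int → Int) (n : Int)
    (h : ∀ x, 0 ≤ x → x < n → mv x ≤ Mv x) : ∀ j i, 0 ≤ pvDP Mv mv n j i := by
  intro j i
  match j with
  | 0 => exact le_refl 0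
  | 1 =>
    simp only [pvDP]
    split_ifs with hc
    · have := h (i - 1) (by omega) (by omega); omega
    · exact le_refl 0
  | t + 2 =>
    simp only [pvDP]
    split_ifs with hc
    · exact pvFoldl_max_init _ _ 0
    · exact le_refl 0

theorem pvDP_congr (Mv mv Mv' mv' : Int → Int) (n : Int)
    (h : ∀ x, 0 ≤ x → x < n → Mv x = Mv' x ∧ mv x = mv' x) :
    ∀ j i, pvDP Mv mv n j i = pvDP Mv' mv' n j i := by
  intro j
  induction j using Nat.strong_induction_on with
  | _ j ih =>
    intro i
    match j with
    | 0 => rfl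
    | 1 =>
      simp only [pvDP]
      split_ifs with hc
      · rw [(h (i - 1) (by omega) (by omega)).1, (h (i - 1) (by omega) (by omega)).2]
      · rfl
    | t + 2 =>
      simp only [pvDP]
      split_ifs with hc
      · apply PySem.List.foldl_congr_mem
        intro acc x hx
        have hb := PySem.List.mem_pyRange_one.mp hx
        rw [ih (t + 1) (by omega) x, (h (i - 1) (by omega) (by omega)).1,
          (h (x - 1) (by omega) (by omega)).2]
      · rfl

-- A's first dp loop (column 1)
theorem pvA_dp1 (Mv mv : Int → Int) : ∀ (b : Int), 0 ≤ b → ∀ x y,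
    pvGet2 ((PySem.List.pyRange 1 (b + 1)).foldl
        (fun dp i => pvSet2 dp i 1 (Mv (i - 1) - mv (i - 1))) []) x y
      = if y = 1 ∧ 1 ≤ x ∧ x ≤ b then Mv (x - 1) - mv (x - 1) else 0 := by
  intro b hb
  induction b, hb using Int.le_induction with
  | base =>
    intro x y
    rw [show (0 : Int) + 1 = 1 by norm_num, PySem.List.pyRange_one_eq_nil (le_refl 1)]
    simp only [List.foldl_nil, pvGet2_nil]
    rw [if_neg (by omega)]
  | succ b hb ih =>
    intro x y
    rw [PySem.List.pyRange_one_succ_right (by omega : (1 : Int) ≤ b + 1), List.foldl_append]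
    simp only [List.foldl_cons, List.foldl_nil]
    rw [pvGet2_set2]
    by_cases hxy : x = b + 1 ∧ y = 1
    · obtain ⟨hx, hy⟩ := hxy
      subst hx; subst hy
      rw [if_pos ⟨rfl, rfl⟩, if_pos ⟨rfl, by omega, by omega⟩]
    · rw [if_neg hxy, ih x y]
      by_cases hc : y = 1 ∧ 1 ≤ x ∧ x ≤ b
      · rw [if_pos hc, if_pos ⟨hc.1, hc.2.1, by omega⟩]
      · rw [if_neg hc, if_neg (by omega)]

-- A's innermost loop: repeated in-place max at one cell is a fold of max
theorem pvA_lloop (Mv mv : Int → Int) (i j : Int) :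
    ∀ (ls : List Int) (dp : List ((Int × Int) × Int)) (x y : Int),
    pvGet2 (ls.foldl (fun dp l => pvSet2 dp i j (max (pvGet2 dp i j)
        (pvGet2 dp l (j - 1) + Mv (i - 1) - mv (l - 1)))) dp) x y
      = if x = i ∧ y = j then
          ls.foldl (fun acc l => max acc (pvGet2 dp l (j - 1) + Mv (i - 1) - mv (l - 1)))
            (pvGet2 dp i j)
        else pvGet2 dp x y := by
  intro ls
  induction ls with
  | nil =>
    intro dp x y
    simp only [List.foldl_nil]
    split_ifs with h
    · rw [h.1, h.2]
    · rfl
  | cons l rest ih =>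
    intro dp x y
    simp only [List.foldl_cons]
    rw [ih]
    have hrd : ∀ l' : Int,
        pvGet2 (pvSet2 dp i j (max (pvGet2 dp i j)
          (pvGet2 dp l (j - 1) + Mv (i - 1) - mv (l - 1)))) l' (j - 1)
        = pvGet2 dp l' (j - 1) := by
      intro l'; rw [pvGet2_set2, if_neg (by omega)]
    have hini : pvGet2 (pvSet2 dp i j (max (pvGet2 dp i j)
          (pvGet2 dp l (j - 1) + Mv (i - 1) - mv (l - 1)))) i j
        = max (pvGet2 dp i j) (pvGet2 dp l (j - 1) + Mv (i - 1) - mv (l - 1)) := by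
      rw [pvGet2_set2, if_pos ⟨rfl, rfl⟩]
    split_ifs with h
    · rw [hini]
      exact PySem.List.foldl_congr_mem _ _ _ _ (fun acc z hz => by rw [hrd])
    · rw [pvGet2_set2, if_neg h]

theorem pvDP_zero_of_gt (Mv mv : Int → Int) (n j i : Int) (hj : 2 ≤ j)
    (h : ¬(j ≤ i ∧ i ≤ n)) : pvDP Mv mv n j.toNat i = 0 := by
  rw [pvDP_two Mv mv n j i hj, if_neg h]

theorem pvG_def (Mv mv : Int → Int) (n J x y : Int) :
    pvG Mv mv n J x y = if 1 ≤ y ∧ y ≤ J then pvDP Mv mv n y.toNat x else 0 := rfl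

theorem pvDP_one (Mv mv : Int → Int) (n i : Int) :
    pvDP Mv mv n 1 i = if 1 ≤ i ∧ i ≤ n then Mv (i - 1) - mv (i - 1) else 0 := rfl

theorem pvG_one (Mv mv : Int → Int) (n x y : Int) :
    pvG Mv mv n 1 x y = if y = 1 ∧ 1 ≤ x ∧ x ≤ n then Mv (x - 1) - mv (x - 1) else 0 := by
  rw [pvG_def]
  by_cases hy : y = 1
  · rw [hy, if_pos (by omega), show ((1 : Int).toNat) = 1 from rfl, pvDP_one]
    split_ifs <;> first | rfl | omega
  · rw [if_neg (by omega), if_neg (by omega)]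

theorem pvG_succ (Mv mv : Int → Int) (n J : Int) (hJ : 1 ≤ J) : ∀ x y,
    (if y = J + 1 ∧ J + 1 ≤ x ∧ x < n + 1 then pvDP Mv mv n (J + 1).toNat x
     else pvG Mv mv n J x y) = pvG Mv mv n (J + 1) x y := by
  intro x y
  unfold pvG
  by_cases h1 : y = J + 1 ∧ J + 1 ≤ x ∧ x < n + 1
  · rw [if_pos h1, if_pos (by omega), h1.1]
  · rw [if_neg h1]
    by_cases h2 : 1 ≤ y ∧ y ≤ J
    · rw [if_pos h2, if_pos (by omega)]
    · rw [if_neg h2]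
      by_cases h3 : 1 ≤ y ∧ y ≤ J + 1
      · rw [if_pos h3]
        have hy : y = J + 1 := by omega
        subst hy
        rw [pvDP_zero_of_gt _ _ _ _ _ (by omega) (by omega)]
      · rw [if_neg h3]

-- A's middle loop: filling column j left to right
theorem pvA_iloop (Mv mv : Int → Int) (n j : Int) (hj : 2 ≤ j) :
    ∀ I, j ≤ I → I ≤ n + 1 → ∀ dp, (∀ x y, pvGet2 dp x y = pvG Mv mv n (j - 1) x y) →
    ∀ x y, pvGet2 ((PySem.List.pyRange j I).foldl (fun dp i =>
        (PySem.List.pyRange (j - 1) i).foldl (fun dp l =>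
          pvSet2 dp i j (max (pvGet2 dp i j)
            (pvGet2 dp l (j - 1) + Mv (i - 1) - mv (l - 1)))) dp) dp) x y
      = if y = j ∧ j ≤ x ∧ x < I then pvDP Mv mv n j.toNat x else pvG Mv mv n (j - 1) x y := by
  intro I hI1
  induction I, hI1 using Int.le_induction with
  | base =>
    intro _ dp hdp x y
    rw [PySem.List.pyRange_one_eq_nil (le_refl j)]
    simp only [List.foldl_nil]
    rw [hdp x y, if_neg (by omega)]
  | succ I hI ih =>
    intro hI2 dp hdp x y
    rw [PySem.List.pyRange_one_succ_right hI, List.foldl_append]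
    simp only [List.foldl_cons, List.foldl_nil]
    rw [pvA_lloop]
    have hS := ih (by omega) dp hdp
    by_cases h1 : x = I ∧ y = j
    · obtain ⟨hx, hy⟩ := h1
      rw [hx, hy]
      rw [if_pos ⟨rfl, rfl⟩, if_pos ⟨rfl, hI, by omega⟩]
      have hini : pvGet2 ((PySem.List.pyRange j I).foldl (fun dp i =>
          (PySem.List.pyRange (j - 1) i).foldl (fun dp l =>
            pvSet2 dp i j (max (pvGet2 dp i j)
              (pvGet2 dp l (j - 1) + Mv (i - 1) - mv (l - 1)))) dp) dp) I j = 0 := by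
        rw [hS I j, if_neg (by omega), pvG_def, if_neg (by omega)]
      rw [hini, pvDP_two Mv mv n j I hj, if_pos ⟨hI, by omega⟩]
      apply PySem.List.foldl_congr_mem
      intro acc l hl
      have hb := PySem.List.mem_pyRange_one.mp hl
      rw [hS l (j - 1), if_neg (by omega), pvG_def, if_pos (by omega)]
    · rw [if_neg h1, hS x y]
      split_ifs with h2 h3 <;> first | rfl | omega

-- A's outer loop over columns
theorem pvA_jloop (Mv mv : Int → Int) (n : Int) :
    ∀ J, 1 ≤ J → ∀ dp, (∀ x y, pvGet2 dp x y = pvG Mv mv n 1 x y) →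
    ∀ x y, pvGet2 ((PySem.List.pyRange 2 (J + 1)).foldl (fun dp j =>
        (PySem.List.pyRange j (n + 1)).foldl (fun dp i =>
          (PySem.List.pyRange (j - 1) i).foldl (fun dp l =>
            pvSet2 dp i j (max (pvGet2 dp i j)
              (pvGet2 dp l (j - 1) + Mv (i - 1) - mv (l - 1)))) dp) dp) dp) x y
      = pvG Mv mv n J x y := by
  intro J hJ
  induction J, hJ using Int.le_induction with
  | base =>
    intro dp hdp x y
    rw [show (1 : Int) + 1 = 2 by norm_num, PySem.List.pyRange_one_eq_nil (le_refl 2)]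
    simp only [List.foldl_nil]
    exact hdp x y
  | succ J hJ ih =>
    intro dp hdp x y
    rw [PySem.List.pyRange_one_succ_right (by omega : (2 : Int) ≤ J + 1), List.foldl_append]
    simp only [List.foldl_cons, List.foldl_nil]
    have hS := ih dp hdp
    by_cases hcase : J + 1 ≤ n
    · have hi := pvA_iloop Mv mv n (J + 1) (by omega) (n + 1) (by omega) (le_refl _) _
        (by intro x' y'; rw [hS x' y', show J + 1 - 1 = J by omega])
      rw [hi x y, show J + 1 - 1 = J by omega, ← pvG_succ Mv mv n J hJ x y]
    · rw [PySem.List.pyRange_one_eq_nil (show (n : Int) + 1 ≤ J + 1 by omega)]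
      simp only [List.foldl_nil]
      rw [hS x y, ← pvG_succ Mv mv n J hJ x y, if_neg (by omega)]

theorem pvFoldl_max_add (g : Int → Int) (C : Int) :
    ∀ (ls : List Int) (x : Int),
    ls.foldl (fun a l => max a (g l + C)) (x + C) = ls.foldl (fun a l => max a (g l)) x + C := by
  intro ls
  induction ls with
  | nil => intro x; rfl
  | cons l rest ih =>
    intro x
    simp only [List.foldl_cons]
    rw [max_add_add_right, ih]

theorem pvFoldl_max_absorb (f : Int → Int) :
    ∀ (ls : List Int) (x : Int), 0 ≤ x → (∀ l ∈ ls, f l = 0) →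
    ls.foldl (fun a l => max a (f l)) x = x := by
  intro ls
  induction ls with
  | nil => intro x _ _; rfl
  | cons l rest ih =>
    intro x hx hz
    simp only [List.foldl_cons, hz l List.mem_cons_self]
    rw [show max x 0 = x by omega]
    exact ih x hx (fun l' hl' => hz l' (List.mem_cons_of_mem _ hl'))

theorem pvBest_succ (Mv mv : Int → Int) (n j b : Int) (h : j ≤ b) :
    pvBest Mv mv n j (b + 1)
      = max (pvBest Mv mv n j b) (pvDP Mv mv n (j - 1).toNat b - mv (b - 1)) := by
  unfold pvBest
  rw [PySem.List.pyRange_one_succ_right h, List.foldl_append]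
  rfl

-- A's column values, written with B's running maximum
theorem pvDP_eq_best (Mv mv : Int → Int) (n : Int)
    (hMono : ∀ x y, 0 ≤ y → y ≤ x → x < n → mv y ≤ Mv x)
    (j i : Int) (hj : 2 ≤ j) (hji : j ≤ i) (hin : i ≤ n) :
    pvDP Mv mv n j.toNat i = Mv (i - 1) + pvBest Mv mv n j i := by
  rw [pvDP_two Mv mv n j i hj, if_pos ⟨hji, hin⟩,
    PySem.List.pyRange_one_cons (show j - 1 < i by omega)]
  simp only [List.foldl_cons]
  have hc0 : (0 : Int) ≤ pvDP Mv mv n (j - 1).toNat (j - 1) + Mv (i - 1) - mv (j - 1 - 1) := by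
    have h1 := pvDP_nonneg Mv mv n (fun x h0 h1 => hMono x x h0 (le_refl x) h1)
      (j - 1).toNat (j - 1)
    have h2 := hMono (i - 1) (j - 1 - 1) (by omega) (by omega) (by omega)
    omega
  rw [show max 0 (pvDP Mv mv n (j - 1).toNat (j - 1) + Mv (i - 1) - mv (j - 1 - 1))
      = pvDP Mv mv n (j - 1).toNat (j - 1) + Mv (i - 1) - mv (j - 1 - 1) by omega]
  have hfun : (fun (acc : Int) (l : Int) => max acc (pvDP Mv mv n (j - 1).toNat l + Mv (i - 1) - mv (l - 1)))
      = (fun (acc : Int) (l : Int) => max acc ((pvDP Mv mv n (j - 1).toNat l - mv (l - 1)) + Mv (i - 1))) := by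
    funext acc l
    congr 1
    omega
  rw [hfun, show pvDP Mv mv n (j - 1).toNat (j - 1) + Mv (i - 1) - mv (j - 1 - 1)
      = (pvDP Mv mv n (j - 1).toNat (j - 1) - mv (j - 2)) + Mv (i - 1) by
        rw [show j - 1 - 1 = j - 2 by omega]; omega,
    pvFoldl_max_add]
  unfold pvBest
  rw [show j - 1 + 1 = j by omega]
  omega

-- B's first-row comprehension
theorem pvB_prev (Mv mv : Int → Int) : ∀ (b : Int), 0 ≤ b → ∀ q,
    pvGet1 ((PySem.List.pyRange 0 b).foldl (fun p i => pvSet1 p i (Mv i - mv i)) []) q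
      = if 0 ≤ q ∧ q < b then Mv q - mv q else 0 := by
  intro b hb
  induction b, hb using Int.le_induction with
  | base =>
    intro q
    rw [PySem.List.pyRange_one_eq_nil (le_refl 0)]
    simp only [List.foldl_nil, pvGet1_nil]
    rw [if_neg (by omega)]
  | succ b hb ih =>
    intro q
    rw [PySem.List.pyRange_one_succ_right hb, List.foldl_append]
    simp only [List.foldl_cons, List.foldl_nil]
    rw [pvGet1_set1]
    by_cases hq : q = b
    · rw [if_pos hq, hq, if_pos (by omega)]
    · rw [if_neg hq, ih q]
      split_ifs <;> first | rfl | omega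

-- B's inner loop with the running maximum
theorem pvB_iloop (Mv mv : Int → Int) (n j : Int) (prev : List (Int × Int)) (hjn : j ≤ n)
    (hP : ∀ q, pvGet1 prev q = if j - 2 ≤ q ∧ q ≤ n - 1 then pvDP Mv mv n (j - 1).toNat (q + 1) else 0) :
    ∀ I, j + 1 ≤ I → I ≤ n + 1 →
    ((PySem.List.pyRange (j + 1) I).foldl
        (fun (t : Int × List (Int × Int)) i =>
          (max t.1 (pvGet1 prev (i - 2) - mv (i - 2)),
           pvSet1 t.2 (i - 1) (Mv (i - 1) + max t.1 (pvGet1 prev (i - 2) - mv (i - 2)))))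
        (pvGet1 prev (j - 2) - mv (j - 2), pvSet1 [] (j - 1) (Mv (j - 1) + (pvGet1 prev (j - 2) - mv (j - 2))))).1
      = pvBest Mv mv n j (I - 1)
    ∧ ∀ q, pvGet1 ((PySem.List.pyRange (j + 1) I).foldl
        (fun (t : Int × List (Int × Int)) i =>
          (max t.1 (pvGet1 prev (i - 2) - mv (i - 2)),
           pvSet1 t.2 (i - 1) (Mv (i - 1) + max t.1 (pvGet1 prev (i - 2) - mv (i - 2)))))
        (pvGet1 prev (j - 2) - mv (j - 2), pvSet1 [] (j - 1) (Mv (j - 1) + (pvGet1 prev (j - 2) - mv (j - 2))))).2 q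
      = if j - 1 ≤ q ∧ q ≤ I - 2 then Mv q + pvBest Mv mv n j (q + 1) else 0 := by
  intro I hI1
  induction I, hI1 using Int.le_induction with
  | base =>
    intro _hI2
    rw [PySem.List.pyRange_one_eq_nil (le_refl (j + 1))]
    simp only [List.foldl_nil]
    have hbase : pvGet1 prev (j - 2) - mv (j - 2) = pvBest Mv mv n j j := by
      rw [hP (j - 2), if_pos (by omega)]
      unfold pvBest
      rw [PySem.List.pyRange_one_eq_nil (le_refl j)]
      simp only [List.foldl_nil]
      rw [show j - 2 + 1 = j - 1 by omega]
    constructor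
    · rw [show j + 1 - 1 = j by omega]
      exact hbase
    · intro q
      rw [pvGet1_set1]
      by_cases hq : q = j - 1
      · rw [if_pos hq, if_pos (by omega), hq, hbase, show j - 1 + 1 = j by omega]
      · rw [if_neg hq, if_neg (by omega)]
        rfl
  | succ I hI ih =>
    intro hI2
    obtain ⟨ihb, ihc⟩ := ih (by omega)
    rw [PySem.List.pyRange_one_succ_right hI, List.foldl_append]
    simp only [List.foldl_cons, List.foldl_nil]
    have hb := pvBest_succ Mv mv n j (I - 1) (by omega)
    rw [show I - 1 + 1 = I by omega, show I - 1 - 1 = I - 2 by omega] at hb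
    have hstep : max ((PySem.List.pyRange (j + 1) I).foldl
        (fun (t : Int × List (Int × Int)) i =>
          (max t.1 (pvGet1 prev (i - 2) - mv (i - 2)),
           pvSet1 t.2 (i - 1) (Mv (i - 1) + max t.1 (pvGet1 prev (i - 2) - mv (i - 2)))))
        (pvGet1 prev (j - 2) - mv (j - 2), pvSet1 [] (j - 1) (Mv (j - 1) + (pvGet1 prev (j - 2) - mv (j - 2))))).1
        (pvGet1 prev (I - 2) - mv (I - 2)) = pvBest Mv mv n j I := by
      rw [ihb, hP (I - 2), if_pos (by omega), show I - 2 + 1 = I - 1 by omega, hb]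
    constructor
    · rw [show I + 1 - 1 = I by omega]
      exact hstep
    · intro q
      rw [pvGet1_set1]
      by_cases hq : q = I - 1
      · rw [if_pos hq, if_pos (by omega), hq, hstep, show I - 1 + 1 = I by omega]
      · rw [if_neg hq, ihc q]
        split_ifs <;> first | rfl | omega

-- B's outer loop
theorem pvB_jloop (Mv mv : Int → Int) (n : Int)
    (hMono : ∀ x y, 0 ≤ y → y ≤ x → x < n → mv y ≤ Mv x) :
    ∀ J, 1 ≤ J → J ≤ n → ∀ (s : Int × List (Int × Int)), s.1 = pvAns Mv mv n 1 →
    (∀ q, pvGet1 s.2 q = if 0 ≤ q ∧ q ≤ n - 1 then pvDP Mv mv n 1 (q + 1) else 0) →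
    ((PySem.List.pyRange 2 (J + 1)).foldl
        (fun (s : Int × List (Int × Int)) j =>
          (max s.1 (pvGet1 ((PySem.List.pyRange (j + 1) (n + 1)).foldl
              (fun (t : Int × List (Int × Int)) i =>
                (max t.1 (pvGet1 s.2 (i - 2) - mv (i - 2)),
                 pvSet1 t.2 (i - 1) (Mv (i - 1) + max t.1 (pvGet1 s.2 (i - 2) - mv (i - 2)))))
              (pvGet1 s.2 (j - 2) - mv (j - 2),
               pvSet1 [] (j - 1) (Mv (j - 1) + (pvGet1 s.2 (j - 2) - mv (j - 2))))).2 (n - 1)),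
           (((PySem.List.pyRange (j + 1) (n + 1)).foldl
              (fun (t : Int × List (Int × Int)) i =>
                (max t.1 (pvGet1 s.2 (i - 2) - mv (i - 2)),
                 pvSet1 t.2 (i - 1) (Mv (i - 1) + max t.1 (pvGet1 s.2 (i - 2) - mv (i - 2)))))
              (pvGet1 s.2 (j - 2) - mv (j - 2),
               pvSet1 [] (j - 1) (Mv (j - 1) + (pvGet1 s.2 (j - 2) - mv (j - 2))))).2))) s).1
      = pvAns Mv mv n J
    ∧ ∀ q, pvGet1 ((PySem.List.pyRange 2 (J + 1)).foldl
        (fun (s : Int × List (Int × Int)) j =>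
          (max s.1 (pvGet1 ((PySem.List.pyRange (j + 1) (n + 1)).foldl
              (fun (t : Int × List (Int × Int)) i =>
                (max t.1 (pvGet1 s.2 (i - 2) - mv (i - 2)),
                 pvSet1 t.2 (i - 1) (Mv (i - 1) + max t.1 (pvGet1 s.2 (i - 2) - mv (i - 2)))))
              (pvGet1 s.2 (j - 2) - mv (j - 2),
               pvSet1 [] (j - 1) (Mv (j - 1) + (pvGet1 s.2 (j - 2) - mv (j - 2))))).2 (n - 1)),
           (((PySem.List.pyRange (j + 1) (n + 1)).foldl
              (fun (t : Int × List (Int × Int)) i =>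
                (max t.1 (pvGet1 s.2 (i - 2) - mv (i - 2)),
                 pvSet1 t.2 (i - 1) (Mv (i - 1) + max t.1 (pvGet1 s.2 (i - 2) - mv (i - 2)))))
              (pvGet1 s.2 (j - 2) - mv (j - 2),
               pvSet1 [] (j - 1) (Mv (j - 1) + (pvGet1 s.2 (j - 2) - mv (j - 2))))).2))) s).2 q
      = if J - 1 ≤ q ∧ q ≤ n - 1 then pvDP Mv mv n J.toNat (q + 1) else 0 := by
  intro J hJ1
  induction J, hJ1 using Int.le_induction with
  | base =>
    intro _hJn s hs1 hs2
    rw [show (1 : Int) + 1 = 2 by norm_num, PySem.List.pyRange_one_eq_nil (le_refl 2)]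
    simp only [List.foldl_nil]
    refine ⟨hs1, fun q => ?_⟩
    rw [hs2 q]
    split_ifs <;> first | rfl | omega
  | succ J hJ ih =>
    intro hJn s hs1 hs2
    obtain ⟨ih1, ih2⟩ := ih (by omega) s hs1 hs2
    rw [PySem.List.pyRange_one_succ_right (by omega : (2 : Int) ≤ J + 1), List.foldl_append]
    simp only [List.foldl_cons, List.foldl_nil]
    have hiloop := pvB_iloop Mv mv n (J + 1) _ (by omega)
      (by intro q
          rw [show J + 1 - 2 = J - 1 by omega, show J + 1 - 1 = J by omega]
          exact ih2 q)
      (n + 1) (by omega) (le_refl _)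
    obtain ⟨hb1, hb2⟩ := hiloop
    have hAns : pvAns Mv mv n (J + 1) = max (pvAns Mv mv n J) (pvDP Mv mv n (J + 1).toNat n) := by
      unfold pvAns
      rw [PySem.List.pyRange_one_succ_right (by omega : (2 : Int) ≤ J + 1), List.foldl_append]
      simp only [List.foldl_cons, List.foldl_nil]
    constructor
    · rw [ih1, hb2 (n - 1), if_pos (by omega), show n - 1 + 1 = n by omega,
        ← pvDP_eq_best Mv mv n hMono (J + 1) n (by omega) (by omega) (le_refl n), hAns]
    · intro q
      rw [hb2 q]
      split_ifs with h1 h2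
      · rw [pvDP_eq_best Mv mv n hMono (J + 1) (q + 1) (by omega) (by omega) (by omega),
          show q + 1 - 1 = q by omega]
      · omega
      · omega
      · rfl

theorem maximize_cyclic_partition_score_spec : Claim_equal_maximize_cyclic_partition_score := by
  intro nums k _hdom hpre
  obtain ⟨hne, hk⟩ := hpre
  unfold Spec_maximize_cyclic_partition_score
  have hn : (1 : Int) ≤ (nums.length : Int) := by
    have := List.length_pos_of_ne_nil hne; omega
  simp only [maximize_cyclic_partition_score, maximize_cyclic_partition_score_alt]
  set n : Int := (nums.length : Int) with hndef
  -- prefix arrays of both ports, characterised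
  have hA1 : ∀ x, pvGet1 ((PySem.List.pyRange 1 (2 * n)).foldl
      (fun (st : List (Int × Int) × List (Int × Int)) i =>
        (pvSet1 st.1 i (max (pvGet1 st.1 (i - 1)) (PySem.List.pyGetD (nums ++ nums) i 0)),
         pvSet1 st.2 i (min (pvGet1 st.2 (i - 1)) (PySem.List.pyGetD (nums ++ nums) i 0))))
      (pvSet1 [] 0 (PySem.List.pyGetD (nums ++ nums) 0 0),
       pvSet1 [] 0 (PySem.List.pyGetD (nums ++ nums) 0 0))).1 x
      = pvChar max (nums ++ nums) (2 * n) x :=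
    fun x => (pvPrefixFold (nums ++ nums) (2 * n) (by omega) x).1
  have hA2 : ∀ x, pvGet1 ((PySem.List.pyRange 1 (2 * n)).foldl
      (fun (st : List (Int × Int) × List (Int × Int)) i =>
        (pvSet1 st.1 i (max (pvGet1 st.1 (i - 1)) (PySem.List.pyGetD (nums ++ nums) i 0)),
         pvSet1 st.2 i (min (pvGet1 st.2 (i - 1)) (PySem.List.pyGetD (nums ++ nums) i 0))))
      (pvSet1 [] 0 (PySem.List.pyGetD (nums ++ nums) 0 0),
       pvSet1 [] 0 (PySem.List.pyGetD (nums ++ nums) 0 0))).2 x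
      = pvChar min (nums ++ nums) (2 * n) x :=
    fun x => (pvPrefixFold (nums ++ nums) (2 * n) (by omega) x).2
  have hB1 : ∀ x, pvGet1 ((PySem.List.pyRange 1 n).foldl
      (fun (st : List (Int × Int) × List (Int × Int)) i =>
        (pvSet1 st.1 i (max (pvGet1 st.1 (i - 1)) (PySem.List.pyGetD nums i 0)),
         pvSet1 st.2 i (min (pvGet1 st.2 (i - 1)) (PySem.List.pyGetD nums i 0))))
      (pvSet1 [] 0 (PySem.List.pyGetD nums 0 0), pvSet1 [] 0 (PySem.List.pyGetD nums 0 0))).1 x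
      = pvChar max nums n x :=
    fun x => (pvPrefixFold nums n hn x).1
  have hB2 : ∀ x, pvGet1 ((PySem.List.pyRange 1 n).foldl
      (fun (st : List (Int × Int) × List (Int × Int)) i =>
        (pvSet1 st.1 i (max (pvGet1 st.1 (i - 1)) (PySem.List.pyGetD nums i 0)),
         pvSet1 st.2 i (min (pvGet1 st.2 (i - 1)) (PySem.List.pyGetD nums i 0))))
      (pvSet1 [] 0 (PySem.List.pyGetD nums 0 0), pvSet1 [] 0 (PySem.List.pyGetD nums 0 0))).2 x
      = pvChar min nums n x :=
    fun x => (pvPrefixFold nums n hn x).2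
  simp only [hA1, hA2, hB1, hB2]
  set MvA : Int → Int := pvChar max (nums ++ nums) (2 * n) with hMvA
  set mvA : Int → Int := pvChar min (nums ++ nums) (2 * n) with hmvA
  set MvB : Int → Int := pvChar max nums n with hMvB
  set mvB : Int → Int := pvChar min nums n with hmvB
  -- the two pairs of prefix maps agree on [0, n)
  have hagree : ∀ x, 0 ≤ x → x < n → MvA x = MvB x ∧ mvA x = mvB x := by
    intro x h0 h1
    rw [hMvA, hmvA, hMvB, hmvB]
    unfold pvChar
    constructor
    · rw [if_pos (by omega), if_pos (by omega)]
      exact pvPfx_append max nums hne x.toNat (by omega)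
    · rw [if_pos (by omega), if_pos (by omega)]
      exact pvPfx_append min nums hne x.toNat (by omega)
  have hcongr := pvDP_congr MvA mvA MvB mvB n hagree
  have hMonoB : ∀ x y, 0 ≤ y → y ≤ x → x < n → mvB y ≤ MvB x := by
    intro x y h0 hyx hx
    rw [hMvB, hmvB]
    unfold pvChar
    rw [if_pos (by omega), if_pos (by omega)]
    exact le_trans (pvPfx_min_le_max nums y.toNat) (pvPfx_max_mono nums (by omega))
  have hnonnegDP := pvDP_nonneg MvB mvB n (fun x h0 h1 => hMonoB x x h0 (le_refl x) h1)
  -- ===== the A side =====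
  have hdp1 : ∀ x y, pvGet2 ((PySem.List.pyRange 1 (n + 1)).foldl
      (fun dp i => pvSet2 dp i 1 (MvA (i - 1) - mvA (i - 1))) []) x y
      = pvG MvA mvA n 1 x y := by
    intro x y
    rw [pvA_dp1 MvA mvA n (by omega) x y, pvG_one]
  have hjA := pvA_jloop MvA mvA n k hk _ hdp1
  simp only [hjA]
  rw [PySem.List.pyRange_one_cons (show (1 : Int) < k + 1 by omega), List.map_cons,
    PySem.List.max?_id_cons, Option.getD_some, List.foldl_map,
    show (1 : Int) + 1 = 2 by norm_num]
  have hg1 : pvG MvA mvA n k n 1 = pvDP MvB mvB n 1 n := by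
    rw [pvG_def, if_pos ⟨le_refl 1, hk⟩, show ((1 : Int).toNat) = 1 from rfl, hcongr 1 n]
  rw [hg1]
  have hAfold : (PySem.List.pyRange 2 (k + 1)).foldl
      (fun x y => max x (pvG MvA mvA n k n y)) (pvDP MvB mvB n 1 n)
      = (PySem.List.pyRange 2 (k + 1)).foldl
      (fun a j => max a (pvDP MvB mvB n j.toNat n)) (pvDP MvB mvB n 1 n) := by
    apply PySem.List.foldl_congr_mem
    intro acc j hj
    have hb := PySem.List.mem_pyRange_one.mp hj
    rw [pvG_def, if_pos (by omega), hcongr]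
  rw [hAfold, PySem.List.pyRange_one_append 2 (min k n + 1) (k + 1) (by omega) (by omega),
    List.foldl_append]
  have hAnsDef : (PySem.List.pyRange 2 (min k n + 1)).foldl
      (fun a j => max a (pvDP MvB mvB n j.toNat n)) (pvDP MvB mvB n 1 n)
      = pvAns MvB mvB n (min k n) := rfl
  rw [hAnsDef, pvFoldl_max_absorb _ _ _
    (le_trans (hnonnegDP 1 n) (by unfold pvAns; exact pvFoldl_max_init _ _ _))
    (by intro j hj
        have hb := PySem.List.mem_pyRange_one.mp hj
        exact pvDP_zero_of_gt MvB mvB n j n (by omega) (by omega))]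
  -- ===== the B side =====
  set Pv : List (Int × Int) := (PySem.List.pyRange 0 n).foldl
      (fun p i => pvSet1 p i (MvB i - mvB i)) [] with hPvdef
  have hprev : ∀ q, pvGet1 Pv q
      = if 0 ≤ q ∧ q ≤ n - 1 then pvDP MvB mvB n 1 (q + 1) else 0 := by
    intro q
    rw [pvB_prev MvB mvB n (by omega) q]
    by_cases hq : 0 ≤ q ∧ q < n
    · rw [if_pos hq, if_pos (by omega), pvDP_one, if_pos (by omega), show q + 1 - 1 = q by omega]
    · rw [if_neg hq, if_neg (by omega)]
  have hAns1 : pvAns MvB mvB n 1 = pvDP MvB mvB n 1 n := by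
    unfold pvAns
    rw [show (1 : Int) + 1 = 2 by norm_num, PySem.List.pyRange_one_eq_nil (le_refl 2),
      List.foldl_nil]
  have hs1 : pvGet1 Pv (n - 1) = pvAns MvB mvB n 1 := by
    rw [hprev (n - 1), if_pos (by omega), show n - 1 + 1 = n by omega, hAns1]
  have hjB := pvB_jloop MvB mvB n hMonoB (min k n) (by omega) (by omega)
    (pvGet1 Pv (n - 1), Pv) hs1 hprev
  rw [hjB.1]
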